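-- pv_equiv track=rewrite | github.com/HurmakR/python-core-marathon | sprint2/s2t1.py | double_string
-- ===== SOURCE A (Python) =====
-- def double_string(data):
--     l=[]
--     for i in set(data):
--         for j in data:
--             if i + j in data :
--                 l.append(i + j)
--     counter = 0
--     for k in data:
--         if k in l:
--             counter += 1
--
--     return counter
-- ===== SOURCE B (Python) =====
-- def double_string(data):
--     # Count elements of data that split into a prefix and a suffix both present in data.
--     s = set(data)
--     return sum(
--         1
--         for k in data
--         if any(k[:m] in s and k[m:] in s for m in range(len(k) + 1))
--     )
-- ===== Notes on version B (the rewrite author's own statement) =====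
-- stated objective: faster
-- what changed: B replaces A's build-a-list-of-all-pair-concatenations-then-rescan by a single pass that, for each element k, checks the split points of k itself (prefix and suffix both in a set of data), so no O(n^2) concatenation table is built.
import Mathlib
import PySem

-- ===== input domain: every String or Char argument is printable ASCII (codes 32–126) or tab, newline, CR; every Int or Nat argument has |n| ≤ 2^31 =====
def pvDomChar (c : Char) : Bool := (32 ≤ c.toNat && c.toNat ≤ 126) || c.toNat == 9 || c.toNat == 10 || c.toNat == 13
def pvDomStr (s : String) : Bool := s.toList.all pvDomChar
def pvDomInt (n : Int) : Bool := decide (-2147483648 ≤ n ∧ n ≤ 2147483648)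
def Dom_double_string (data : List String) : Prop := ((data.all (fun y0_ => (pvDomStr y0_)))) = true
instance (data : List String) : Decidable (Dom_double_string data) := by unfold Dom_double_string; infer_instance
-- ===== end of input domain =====

-- B counts, in one pass, the elements of data that split (at some position) into a
-- prefix and a suffix both present in data, instead of A's table of all pair
-- concatenations rescanned afterwards; faster by avoiding the O(n^2)-entry table.

-- ===== PORT A =====
-- l = []; for i in set(data): for j in data: if i + j in data: l.append(i + j)
-- counter = 0; for k in data: if k in l: counter += 1; return counter
-- (The port iterates set(data) in first-occurrence order; the returned counter only
--  depends on l's MEMBERSHIP, which is independent of the set's iteration order.)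
def double_string (data : List String) : Int :=
  let l : List String := (PySem.Set.ofList data).foldl
    (fun l i => data.foldl
      (fun l j => if data.contains (i ++ j) then l ++ [i ++ j] else l) l) []
  data.foldl (fun counter k => if l.contains k then counter + 1 else counter) 0

-- ===== PORT B =====
-- s = set(data); sum(1 for k in data if any(k[:m] in s and k[m:] in s for m in range(len(k)+1)))
def double_string_alt (data : List String) : Int :=
  let s := PySem.Set.ofList data
  (data.map (fun k =>
    if (PySem.List.pyRange 0 (PySem.Str.len k + 1) 1).any (fun m =>
        PySem.Set.contains s (PySem.Str.slice k none (some m)) &&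
        PySem.Set.contains s (PySem.Str.slice k (some m) none))
    then (1 : Int) else 0)).sum

-- ===== PRECONDITION & SPEC =====
def Spec_double_string (data : List String) (out : Int) : Prop := out = double_string_alt data
instance (data : List String) (out : Int) : Decidable (Spec_double_string data out) := by unfold Spec_double_string; infer_instance

-- ===== CLAIM (what is proved, stated in full; the proofs are below) =====
def Claim_equal_double_string : Prop := ∀ (data : List String), Dom_double_string data → Spec_double_string data (double_string data)

-- ===== LEMMAS AND PROOFS =====

-- One split point of k with both halves in data ≡ one pair (i, j) from data with i ++ j = k.
lemma split_exists_iff (data : List String) (k : String) :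
    (∃ m : Int, (0 ≤ m ∧ m < PySem.Str.len k + 1) ∧
        PySem.Str.slice k none (some m) ∈ data ∧ PySem.Str.slice k (some m) none ∈ data)
    ↔ (∃ i ∈ data, ∃ j ∈ data, i ++ j = k) := by
  constructor
  · rintro ⟨m, ⟨hm0, _⟩, hpre, hsuf⟩
    refine ⟨_, hpre, _, hsuf, ?_⟩
    rw [← String.toList_inj, String.toList_append, PySem.Str.toList_slice,
        PySem.Str.toList_slice, PySem.Chars.slice_eq_listSlice,
        PySem.Chars.slice_eq_listSlice, PySem.List.slice_to _ hm0,
        PySem.List.slice_from _ hm0, List.take_append_drop]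
  · rintro ⟨i, hi, j, hj, hij⟩
    refine ⟨(i.toList.length : Int), ⟨by positivity, ?_⟩, ?_, ?_⟩
    · have : i.toList.length ≤ k.toList.length := by
        rw [← hij, String.toList_append, List.length_append]; omega
      rw [PySem.Str.len_eq]; omega
    · have : PySem.Str.slice k none (some (i.toList.length : Int)) = i := by
        rw [← String.toList_inj, PySem.Str.toList_slice, PySem.Chars.slice_eq_listSlice,
            PySem.List.slice_to _ (by positivity), Int.toNat_natCast, ← hij,
            String.toList_append, List.take_left]
      rwa [this]
    · have : PySem.Str.slice k (some (i.toList.length : Int)) none = j := by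
        rw [← String.toList_inj, PySem.Str.toList_slice, PySem.Chars.slice_eq_listSlice,
            PySem.List.slice_from _ (by positivity), Int.toNat_natCast, ← hij,
            String.toList_append, List.drop_left]
      rwa [this]

-- For every k ∈ data, A's membership test in the table l equals B's split-point scan.
lemma pointwise_eq (data : List String) (k : String) (hk : k ∈ data) :
    (((PySem.Set.ofList data).foldl
        (fun l i => data.foldl
          (fun l j => if data.contains (i ++ j) then l ++ [i ++ j] else l) l) []).contains k)
    = ((PySem.List.pyRange 0 (PySem.Str.len k + 1) 1).any (fun m =>
        PySem.Set.contains (PySem.Set.ofList data) (PySem.Str.slice k none (some m)) &&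
        PySem.Set.contains (PySem.Set.ofList data) (PySem.Str.slice k (some m) none))) := by
  have hl : ((PySem.Set.ofList data).foldl
      (fun l i => data.foldl
        (fun l j => if data.contains (i ++ j) then l ++ [i ++ j] else l) l) [])
      = (PySem.Set.ofList data).flatMap
          (fun i => (data.filter (fun j => data.contains (i ++ j))).map (fun j => i ++ j)) := by
    have hstep : ∀ (i : String) (acc : List String),
        data.foldl (fun l j => if data.contains (i ++ j) then l ++ [i ++ j] else l) acc
          = acc ++ (data.filter (fun j => data.contains (i ++ j))).map (fun j => i ++ j) :=
      fun i acc => PySem.List.foldl_append_if _ _ _ _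
    calc (PySem.Set.ofList data).foldl
          (fun l i => data.foldl
            (fun l j => if data.contains (i ++ j) then l ++ [i ++ j] else l) l) []
        = (PySem.Set.ofList data).foldl
            (fun l i => l ++ (data.filter (fun j => data.contains (i ++ j))).map (fun j => i ++ j)) [] := by
          exact PySem.List.foldl_congr_mem _ _ _ _ (fun acc x _ => hstep x acc)
      _ = _ := by
          rw [PySem.List.foldl_append_eq_flatMap]; simp
  rw [hl]
  apply Bool.eq_iff_iff.mpr
  rw [List.contains_iff_mem, List.any_eq_true]
  simp only [List.mem_flatMap, List.mem_map, List.mem_filter, PySem.Set.mem_ofList,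
    PySem.List.mem_pyRange_one, Bool.and_eq_true]
  constructor
  · rintro ⟨i, hi, j, ⟨hj, _⟩, hij⟩
    have := (split_exists_iff data k).mpr ⟨i, hi, j, hj, hij⟩
    rcases this with ⟨m, hm, hpre, hsuf⟩
    refine ⟨m, hm, ?_, ?_⟩
    · change List.contains _ _ = true
      rw [List.contains_iff_mem, PySem.Set.mem_ofList]; exact hpre
    · change List.contains _ _ = true
      rw [List.contains_iff_mem, PySem.Set.mem_ofList]; exact hsuf
  · rintro ⟨m, hm, hpre, hsuf⟩
    have hpre' : PySem.Str.slice k none (some m) ∈ data := by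
      rw [← PySem.Set.mem_ofList, ← @List.contains_iff_mem]; exact hpre
    have hsuf' : PySem.Str.slice k (some m) none ∈ data := by
      rw [← PySem.Set.mem_ofList, ← @List.contains_iff_mem]; exact hsuf
    rcases (split_exists_iff data k).mp ⟨m, hm, hpre', hsuf'⟩ with ⟨i, hi, j, hj, hij⟩
    exact ⟨i, hi, j, ⟨hj, by rw [hij, List.contains_iff_mem]; exact hk⟩, hij⟩

-- ===== VERDICT (by name: the statement is the Claim_ definition above) =====
theorem double_string_spec : Claim_equal_double_string := by
  intro data _
  unfold Spec_double_string double_string double_string_alt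
  rw [PySem.List.foldl_count_if, PySem.List.sum_map_ite_one_zero, zero_add]
  congr 1
  exact List.countP_congr (fun k hk => by rw [pointwise_eq data k hk])
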